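-- pv_equiv track=rewrite | github.com/shubham2338/GFG | Medium/Geek hates too many 1s/geek-hates-too-many-1s.py | noConseBits
-- ===== SOURCE A (Python) =====
-- def noConseBits(n : int) -> int:
--     bs=bin(n)[2:]
--     tl=[i for i in bs]
--     i=0
--     while i<len(bs)-1:
--         if bs[i]=='1':
--             c=1
--             while c!=3:
--                 i+=1
--                 if i<len(bs) and bs[i]=='1':
--                     c+=1
--                 else:
--                     i+=1
--                     break
--             else:
--                 tl[i]='0'
--                 i+=1
--         else:
--             i+=1
--     bs=''.join(tl)
--     return(int(bs,2))
-- ===== SOURCE B (Python) =====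
-- def noConseBits(n: int) -> int:
--     # Run-at-a-time recursive rebuild: split off each maximal run of '1's,
--     # emit it with every third bit cleared, and recurse on the remainder.
--     def ones(s):
--         return 1 + ones(s[1:]) if s and s[0] == '1' else 0
--
--     def rec(s):
--         if not s:
--             return ''
--         if s[0] != '1':
--             return s[0] + rec(s[1:])
--         L = ones(s)
--         run = ''.join('0' if j % 3 == 2 else '1' for j in range(L))
--         return run + rec(s[L:])
--
--     return int(rec(bin(n)[2:]), 2)
-- ===== Notes on version B (the rewrite author's own statement) =====
-- stated objective: alternative
-- what changed: B replaces A's index-walking outer/inner while loops with in-place list mutation by a recursive rebuild that peels each maximal run of consecutive '1's off the binary string and emits it with every third bit cleared.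
import Mathlib
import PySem

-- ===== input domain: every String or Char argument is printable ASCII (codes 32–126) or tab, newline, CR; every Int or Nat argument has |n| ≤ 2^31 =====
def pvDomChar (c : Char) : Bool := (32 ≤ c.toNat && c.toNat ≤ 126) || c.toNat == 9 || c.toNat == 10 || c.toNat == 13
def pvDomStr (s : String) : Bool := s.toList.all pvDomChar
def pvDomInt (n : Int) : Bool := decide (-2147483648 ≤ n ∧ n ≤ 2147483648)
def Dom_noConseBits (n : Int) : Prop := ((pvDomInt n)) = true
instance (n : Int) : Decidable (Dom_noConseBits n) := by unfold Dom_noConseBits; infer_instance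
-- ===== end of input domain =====

-- B rebuilds the number run-of-ones by run-of-ones instead of A's index-walking
-- double while loop; objective: alternative decomposition, same behaviour on n ≥ 0.

-- ===== PORT A =====
-- shared helper: Python's bin(n)[2:] for n ≥ 0, as a list of '0'/'1' chars (MSB first)
def pvToBinAux : Nat → List Char
  | 0 => []
  | n+1 => pvToBinAux ((n+1)/2) ++ [if (n+1) % 2 = 1 then '1' else '0']

def pvToBin (n : Nat) : List Char := if n = 0 then ['0'] else pvToBinAux n

-- shared helper: Python's int(s, 2) on a '0'/'1' string
def pvFromBin (l : List Char) : Nat :=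
  l.foldl (fun acc c => 2 * acc + (if c = '1' then 1 else 0)) 0

-- inner `while c != 3:` loop of A; fuel 3 is a totality guard only (c walks 1→2→3)
def innerA (bs : List Char) (fuel : Nat) (tl : List Char) (i c : Nat) : List Char × Nat :=
  match fuel with
  | 0 => (tl, i)
  | fuel+1 =>
    if c ≠ 3 then
      if i + 1 < bs.length ∧ bs[i+1]? = some '1' then
        innerA bs fuel tl (i+1) (c+1)
      else
        (tl, i+2)
    else
      (tl.set i '0', i+1)

-- outer `while i < len(bs)-1:` loop of A; fuel = bs.length is a totality guard (i grows each pass)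
def loopA (bs : List Char) (fuel : Nat) (tl : List Char) (i : Nat) : List Char :=
  match fuel with
  | 0 => tl
  | fuel+1 =>
    if i < bs.length - 1 then
      if bs[i]? = some '1' then
        let p := innerA bs 3 tl i 1
        loopA bs fuel p.1 p.2
      else
        loopA bs fuel tl (i+1)
    else
      tl

def noConseBits (n : Int) : Int :=
  let bs := pvToBin n.toNat
  Int.ofNat (pvFromBin (loopA bs bs.length bs 0))

-- ===== PORT B =====
-- length of the leading run of '1's (B's `ones`)
def onesB : List Char → Nat
  | [] => 0
  | x :: xs => if x = '1' then 1 + onesB xs else 0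

theorem onesB_pos : ∀ (x : Char) (xs : List Char), x = '1' → 0 < onesB (x :: xs) := by
  intro x xs h; simp [onesB, h]

-- B's `rec`: peel a maximal run of '1's, emit it with every third bit cleared, recurse
def recB (s : List Char) : List Char :=
  match s with
  | [] => []
  | x :: xs =>
    if h : x = '1' then
      let L := onesB (x :: xs)
      ((List.range L).map (fun j => if j % 3 = 2 then '0' else '1')) ++ recB ((x :: xs).drop L)
    else
      x :: recB xs
termination_by s.length
decreasing_by
  · have := onesB_pos x xs h
    simp [List.length_drop]; omega
  · simp

def noConseBits_alt (n : Int) : Int :=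
  Int.ofNat (pvFromBin (recB (pvToBin n.toNat)))

-- ===== PRECONDITION & SPEC =====
-- Pre_ excludes n < 0, where Python A (and B) raise ValueError: int('b…', 2) on bin(n)[2:].
def Pre_noConseBits (n : Int) : Prop := 0 ≤ n
instance (n : Int) : Decidable (Pre_noConseBits n) := by unfold Pre_noConseBits; infer_instance
def pvWitness_noConseBits : Int := (23)

def Spec_noConseBits (n : Int) (out : Int) : Prop := out = noConseBits_alt n
instance (n : Int) (out : Int) : Decidable (Spec_noConseBits n out) := by unfold Spec_noConseBits; infer_instance

-- ===== CLAIM (what is proved, stated in full; the proofs are below) =====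
def Claim_equal_noConseBits : Prop := ∀ (n : Int), Dom_noConseBits n → Pre_noConseBits n → Spec_noConseBits n (noConseBits n)

-- ===== LEMMAS AND PROOFS =====

-- reference one-pass transform: counter c = number of consecutive '1's seen, mod 3
def fRef : List Char → Nat → List Char
  | [], _ => []
  | x :: xs, c =>
    if x = '1' then (if c = 2 then '0' else '1') :: fRef xs ((c+1) % 3)
    else x :: fRef xs 0

theorem onesB_spec (l : List Char) :
    l.take (onesB l) = List.replicate (onesB l) '1' ∧
      ∀ h : onesB l < l.length, l[onesB l] ≠ '1' := by
  induction l with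
  | nil => simp [onesB]
  | cons x xs ih =>
    by_cases hx : x = '1'
    · subst hx
      have h1 : onesB ('1' :: xs) = onesB xs + 1 := by simp [onesB]; omega
      rw [h1]
      refine ⟨?_, ?_⟩
      · simp [List.replicate_succ, ih.1]
      · intro h
        have h2 : ('1' :: xs)[onesB xs + 1] = xs[onesB xs]'(by simpa using h) := by simp
        rw [h2]; exact ih.2 (by simpa using h)
    · simp [onesB, hx]

theorem fRef_run (L : Nat) : ∀ (c : Nat) (rest : List Char), c < 3 →
    (rest = [] ∨ ∀ h : 0 < rest.length, rest[0] ≠ '1') →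
    fRef (List.replicate L '1' ++ rest) c =
      (List.range L).map (fun j => if (c + j) % 3 = 2 then '0' else '1') ++ fRef rest 0 := by
  induction L with
  | zero =>
    intro c rest _ hrest
    cases rest with
    | nil => simp [fRef]
    | cons r rs =>
      have hr : r ≠ '1' := by
        rcases hrest with h | h
        · simp at h
        · simpa using h (by simp)
      simp [fRef, hr]
  | succ L ih =>
    intro c rest hc hrest
    have hrec := ih ((c+1) % 3) rest (by omega) hrest
    have hcons : List.replicate (L+1) '1' ++ rest = '1' :: (List.replicate L '1' ++ rest) := by
      simp [List.replicate_succ]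
    rw [hcons]
    simp only [fRef, if_true]
    rw [hrec, List.range_succ_eq_map]
    simp only [List.map_cons, List.map_map, List.cons_append]
    have hc2 : (if (c + 0) % 3 = 2 then '0' else '1') = (if c = 2 then '0' else '1') := by
      have h0 : (c + 0) % 3 = c := by omega
      rw [h0]
    rw [hc2]
    congr 1
    congr 1
    apply List.map_congr_left
    intro j _
    have hj : ((c + 1) % 3 + j) % 3 = (c + Nat.succ j) % 3 := by omega
    simp [Function.comp, hj]

theorem recB_eq_fRef (s : List Char) : recB s = fRef s 0 := by
  induction s using recB.induct with
  | case1 => simp [recB, fRef]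
  | case2 xs L ih =>
    have hspec := onesB_spec ('1' :: xs)
    have hsplit : '1' :: xs
        = List.replicate (onesB ('1' :: xs)) '1' ++ ('1' :: xs).drop (onesB ('1' :: xs)) := by
      conv_lhs => rw [← List.take_append_drop (onesB ('1' :: xs)) ('1' :: xs)]
      rw [hspec.1]
    have hrest : ('1' :: xs).drop (onesB ('1' :: xs)) = [] ∨
        ∀ h : 0 < (('1' :: xs).drop (onesB ('1' :: xs))).length,
          (('1' :: xs).drop (onesB ('1' :: xs)))[0] ≠ '1' := by
      rcases Nat.lt_or_ge (onesB ('1' :: xs)) ('1' :: xs).length with hlt | hge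
      · right
        intro hpos
        have hgd : (('1' :: xs).drop (onesB ('1' :: xs)))[0]'hpos
            = ('1' :: xs)[onesB ('1' :: xs)]'hlt := by
          simp [List.getElem_drop]
        rw [hgd]
        exact hspec.2 hlt
      · left
        exact List.drop_eq_nil_of_le hge
    rw [recB]
    simp only [reduceDIte]
    conv_rhs => rw [hsplit]
    rw [fRef_run _ 0 _ (by omega) hrest]
    simp only [Nat.zero_add]
    rw [ih]
  | case3 x xs h ih =>
    rw [recB]
    simp only [dif_neg h]
    rw [fRef]
    simp [h, ih]

-- ---- A = fRef ----

theorem fRef_short (l : List Char) (h : l.length ≤ 1) : fRef l 0 = l := by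
  match l with
  | [] => rfl
  | [x] => simp only [fRef]; split_ifs <;> simp_all
  | x :: y :: r => simp at h

theorem terminal_loopA (bs tl : List Char) (i : Nat)
    (hdrop : tl.drop i = bs.drop i) (hi : bs.length - 1 ≤ i) :
    tl.take i ++ fRef (bs.drop i) 0 = tl := by
  have hshort : (bs.drop i).length ≤ 1 := by
    simp only [List.length_drop]; omega
  rw [fRef_short _ hshort, ← hdrop, List.take_append_drop]

theorem drop_congr_add (tl bs : List Char) (i k : Nat) (h : tl.drop i = bs.drop i) :
    tl.drop (i + k) = bs.drop (i + k) := by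
  have e : ∀ (l : List Char), l.drop (i + k) = (l.drop i).drop k := by
    intro l; rw [List.drop_drop]
  rw [e, e, h]

theorem getElem_congr_of_drop (tl bs : List Char) (i k : Nat) (h : tl.drop i = bs.drop i)
    (hk : i + k < tl.length) (hk' : i + k < bs.length) :
    tl[i + k]'hk = bs[i + k]'hk' := by
  have h1 : tl[i + k]? = (tl.drop i)[k]? := by rw [List.getElem?_drop]
  have h2 : bs[i + k]? = (bs.drop i)[k]? := by rw [List.getElem?_drop]
  have : tl[i + k]? = bs[i + k]? := by rw [h1, h2, h]
  rw [List.getElem?_eq_getElem hk, List.getElem?_eq_getElem hk'] at this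
  exact Option.some.inj this

theorem take_succ_getElem (l : List Char) (i : Nat) (h : i < l.length) :
    l.take (i + 1) = l.take i ++ [l[i]'h] := by
  rw [List.take_add_one, List.getElem?_eq_getElem h]
  rfl

theorem drop_set_of_lt (l : List Char) (n m : Nat) (a : Char) (h : n < m) :
    (l.set n a).drop m = l.drop m := by
  apply List.ext_getElem?
  intro k
  rw [List.getElem?_drop, List.getElem?_drop, List.getElem?_set]
  have hne : ¬ n = m + k := by omega
  rw [if_neg hne]

theorem take_set_of_le (l : List Char) (n m : Nat) (a : Char) (h : m ≤ n) :
    (l.set n a).take m = l.take m := by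
  apply List.ext_getElem?
  intro k
  rw [List.getElem?_take, List.getElem?_take]
  split_ifs with hk
  · rw [List.getElem?_set]
    have hne : ¬ n = k := by omega
    rw [if_neg hne]
  · rfl

theorem innerA_break (bs tl : List Char) (i c fuel : Nat) (hc : c ≠ 3)
    (h : ¬ (i + 1 < bs.length ∧ bs[i+1]? = some '1')) :
    innerA bs (fuel+1) tl i c = (tl, i+2) := by
  rw [innerA, if_pos hc, if_neg h]

theorem innerA_step (bs tl : List Char) (i c fuel : Nat) (hc : c ≠ 3)
    (h : i + 1 < bs.length ∧ bs[i+1]? = some '1') :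
    innerA bs (fuel+1) tl i c = innerA bs fuel tl (i+1) (c+1) := by
  rw [innerA, if_pos hc, if_pos h]

theorem innerA_clear (bs tl : List Char) (i fuel : Nat) :
    innerA bs (fuel+1) tl i 3 = (tl.set i '0', i+1) := by
  rw [innerA, if_neg (show ¬((3:Nat) ≠ 3) by omega)]

theorem fRef_cons_one (r : List Char) (c : Nat) :
    fRef ('1' :: r) c = (if c = 2 then '0' else '1') :: fRef r ((c+1) % 3) := by
  simp [fRef]

theorem fRef_cons_other (x : Char) (r : List Char) (c : Nat) (hx : x ≠ '1') :
    fRef (x :: r) c = x :: fRef r 0 := by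
  simp [fRef, hx]

theorem loopA_eq (bs : List Char) : ∀ (fuel i : Nat) (tl : List Char),
    bs.length - 1 - i ≤ fuel → tl.length = bs.length → tl.drop i = bs.drop i →
    loopA bs fuel tl i = tl.take i ++ fRef (bs.drop i) 0 := by
  intro fuel
  induction fuel with
  | zero =>
    intro i tl hfuel hlen hdrop
    rw [loopA]
    exact (terminal_loopA bs tl i hdrop (by omega)).symm
  | succ fuel ih =>
    intro i tl hfuel hlen hdrop
    rw [loopA]
    by_cases hi : i < bs.length - 1
    case neg =>
      rw [if_neg hi]
      exact (terminal_loopA bs tl i hdrop (by omega)).symm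
    case pos =>
    rw [if_pos hi]
    have hi0 : i < bs.length := by omega
    have hi1 : i + 1 < bs.length := by omega
    have hi0t : i < tl.length := by omega
    have hi1t : i + 1 < tl.length := by omega
    have htl0 : tl[i]'hi0t = bs[i]'hi0 := by
      have := getElem_congr_of_drop tl bs i 0 hdrop (by omega) (by omega)
      simpa using this
    have htl1 : tl[i+1]'hi1t = bs[i+1]'hi1 := getElem_congr_of_drop tl bs i 1 hdrop (by omega) (by omega)
    rw [List.getElem?_eq_getElem hi0]
    by_cases hb0 : bs[i]'hi0 = '1'
    case neg =>
      have hne : ¬ (some (bs[i]'hi0) = some '1') := by simpa using hb0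
      rw [if_neg hne]
      rw [ih (i+1) tl (by omega) hlen (drop_congr_add tl bs i 1 hdrop)]
      rw [List.drop_eq_getElem_cons hi0, fRef_cons_other _ _ 0 hb0,
          take_succ_getElem tl i hi0t, htl0]
      simp
    case pos =>
    have hsome : (some (bs[i]'hi0) = some '1') := by rw [hb0]
    rw [if_pos hsome]
    by_cases hb1 : bs[i+1]'hi1 = '1'
    case neg =>
      -- break after c = 2 test fails: inner returns (tl, i+2)
      have hcond : ¬ (i + 1 < bs.length ∧ bs[i+1]? = some '1') := by
        rintro ⟨-, h2⟩
        rw [List.getElem?_eq_getElem hi1] at h2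
        exact hb1 (Option.some.inj h2)
      have hinner : innerA bs 3 tl i 1 = (tl, i+2) := innerA_break bs tl i 1 2 (by omega) hcond
      simp only [hinner]
      rw [ih (i+2) tl (by omega) hlen (drop_congr_add tl bs i 2 hdrop)]
      have t1 : tl.take (i+1) = tl.take i ++ ['1'] := by
        rw [take_succ_getElem tl i hi0t, htl0, hb0]
      have t2 : tl.take (i+2) = tl.take i ++ ['1', bs[i+1]'hi1] := by
        rw [show i + 2 = (i + 1) + 1 from rfl, take_succ_getElem tl (i+1) hi1t, htl1, t1]
        simp
      rw [List.drop_eq_getElem_cons hi0, hb0, fRef_cons_one,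
          List.drop_eq_getElem_cons hi1, fRef_cons_other _ _ _ hb1,
          show i + 1 + 1 = i + 2 from rfl, t2]
      simp
    case pos =>
      have hcond1 : i + 1 < bs.length ∧ bs[i+1]? = some '1' := by
        exact ⟨hi1, by rw [List.getElem?_eq_getElem hi1, hb1]⟩
      have hstep1 : innerA bs 3 tl i 1 = innerA bs 2 tl (i+1) 2 :=
        innerA_step bs tl i 1 2 (by omega) hcond1
      by_cases hi2 : i + 2 < bs.length
      case pos =>
        have hi2t : i + 2 < tl.length := by omega
        have htl2 : tl[i+2]'hi2t = bs[i+2]'hi2 := getElem_congr_of_drop tl bs i 2 hdrop (by omega) (by omega)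
        by_cases hb2 : bs[i+2]'hi2 = '1'
        case pos =>
          -- third consecutive '1': clear it
          have hcond2 : (i+1) + 1 < bs.length ∧ bs[(i+1)+1]? = some '1' := by
            constructor
            · omega
            · rw [show (i+1)+1 = i+2 from rfl, List.getElem?_eq_getElem hi2, hb2]
          have hstep2 : innerA bs 2 tl (i+1) 2 = innerA bs 1 tl (i+2) 3 :=
            innerA_step bs tl (i+1) 2 1 (by omega) hcond2
          have hclear : innerA bs 1 tl (i+2) 3 = (tl.set (i+2) '0', i+3) :=
            innerA_clear bs tl (i+2) 0
          simp only [hstep1, hstep2, hclear]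
          have hlen' : (tl.set (i+2) '0').length = bs.length := by rw [List.length_set]; exact hlen
          have hdrop' : (tl.set (i+2) '0').drop (i+3) = bs.drop (i+3) := by
            rw [drop_set_of_lt tl (i+2) (i+3) '0' (by omega)]
            exact drop_congr_add tl bs i 3 hdrop
          rw [ih (i+3) (tl.set (i+2) '0') (by omega) hlen' hdrop']
          have hset2 : i + 2 < (tl.set (i+2) '0').length := by rw [List.length_set]; exact hi2t
          have t1 : tl.take (i+1) = tl.take i ++ ['1'] := by
            rw [take_succ_getElem tl i hi0t, htl0, hb0]
          have t2 : tl.take (i+2) = tl.take i ++ ['1', '1'] := by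
            rw [show i + 2 = (i + 1) + 1 from rfl, take_succ_getElem tl (i+1) hi1t, htl1, hb1, t1]
            simp
          have t3 : (tl.set (i+2) '0').take (i+3) = tl.take i ++ ['1', '1', '0'] := by
            rw [show i + 3 = (i + 2) + 1 from rfl,
                take_succ_getElem (tl.set (i+2) '0') (i+2) hset2,
                List.getElem_set_self hset2,
                take_set_of_le tl (i+2) (i+2) '0' (by omega), t2]
            simp
          rw [List.drop_eq_getElem_cons hi0, hb0, fRef_cons_one,
              List.drop_eq_getElem_cons hi1, hb1, fRef_cons_one,
              show i + 1 + 1 = i + 2 from rfl,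
              List.drop_eq_getElem_cons hi2, hb2, fRef_cons_one,
              show i + 2 + 1 = i + 3 from rfl, t3]
          simp
        case neg =>
          -- run of exactly two '1's: break, inner returns (tl, i+3)
          have hcond2 : ¬ ((i+1) + 1 < bs.length ∧ bs[(i+1)+1]? = some '1') := by
            rintro ⟨-, h2⟩
            rw [show (i+1)+1 = i+2 from rfl, List.getElem?_eq_getElem hi2] at h2
            exact hb2 (Option.some.inj h2)
          have hbreak : innerA bs 2 tl (i+1) 2 = (tl, (i+1)+2) :=
            innerA_break bs tl (i+1) 2 1 (by omega) hcond2
          simp only [hstep1, hbreak]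
          rw [show (i+1)+2 = i+3 from rfl]
          rw [ih (i+3) tl (by omega) hlen (drop_congr_add tl bs i 3 hdrop)]
          have t1 : tl.take (i+1) = tl.take i ++ ['1'] := by
            rw [take_succ_getElem tl i hi0t, htl0, hb0]
          have t2 : tl.take (i+2) = tl.take i ++ ['1', '1'] := by
            rw [show i + 2 = (i + 1) + 1 from rfl, take_succ_getElem tl (i+1) hi1t, htl1, hb1, t1]
            simp
          have t3 : tl.take (i+3) = tl.take i ++ ['1', '1', bs[i+2]'hi2] := by
            rw [show i + 3 = (i + 2) + 1 from rfl, take_succ_getElem tl (i+2) hi2t, htl2, t2]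
            simp
          rw [List.drop_eq_getElem_cons hi0, hb0, fRef_cons_one,
              List.drop_eq_getElem_cons hi1, hb1, fRef_cons_one,
              show i + 1 + 1 = i + 2 from rfl,
              List.drop_eq_getElem_cons hi2, fRef_cons_other _ _ _ hb2,
              show i + 2 + 1 = i + 3 from rfl, t3]
          simp
      case neg =>
        -- the two '1's end exactly at the end of the string
        have hlen2 : bs.length = i + 2 := by omega
        have hcond2 : ¬ ((i+1) + 1 < bs.length ∧ bs[(i+1)+1]? = some '1') := by
          rintro ⟨h1, -⟩
          omega
        have hbreak : innerA bs 2 tl (i+1) 2 = (tl, (i+1)+2) :=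
          innerA_break bs tl (i+1) 2 1 (by omega) hcond2
        simp only [hstep1, hbreak]
        rw [show (i+1)+2 = i+3 from rfl]
        rw [ih (i+3) tl (by omega) hlen (drop_congr_add tl bs i 3 hdrop)]
        have hd3 : bs.drop (i+3) = [] := List.drop_eq_nil_of_le (by omega)
        have hd2 : bs.drop (i+2) = [] := List.drop_eq_nil_of_le (by omega)
        have ht3 : tl.take (i+3) = tl := List.take_of_length_le (by omega)
        rw [hd3, ht3]
        rw [List.drop_eq_getElem_cons hi0, hb0, fRef_cons_one,
            List.drop_eq_getElem_cons hi1, hb1, fRef_cons_one,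
            show i + 1 + 1 = i + 2 from rfl, hd2]
        have htl : tl = tl.take i ++ tl.drop i := (List.take_append_drop i tl).symm
        conv_lhs => rw [htl]
        rw [hdrop, List.drop_eq_getElem_cons hi0, hb0,
            List.drop_eq_getElem_cons hi1, hb1,
            show i + 1 + 1 = i + 2 from rfl, hd2]
        simp [fRef]

-- ===== VERDICT (by name: the statement is the Claim_ definition above) =====
theorem noConseBits_spec : Claim_equal_noConseBits := by
  unfold Claim_equal_noConseBits
  intro n _ _
  unfold Spec_noConseBits noConseBits noConseBits_alt
  have h := loopA_eq (pvToBin n.toNat) (pvToBin n.toNat).length 0 (pvToBin n.toNat)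
    (by omega) rfl rfl
  simp only [h, List.take_zero, List.drop_zero, List.nil_append, recB_eq_fRef]
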